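-- pv_equiv track=rewrite | github.com/RAJ8664/Leetcode | 4290-valid-elements-in-an-array/4290-valid-elements-in-an-array.py | findValidElements
-- ===== SOURCE A (Python) =====
-- def findValidElements(nums: list[int]) -> list[int]:
--     n = len(nums)
--     maxi = nums[0]
--     res = []
--     for i in range(n):
--         flag = 1
--         if i == 0 or i == n - 1:
--             res.append(nums[i])
--         else:
--             for j in range(i + 1, n):
--                 if nums[i] <= nums[j]:
--                     flag = 0
--                     break
--             if flag: res.append(nums[i])
--             else:
--                 flag = 1
--                 for j in range(0, i):
--                     if nums[i] <= nums[j]: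
--                         flag = 0
--                         break
--                 if flag: res.append(nums[i])
--
--     return res
-- ===== SOURCE B (Python) =====
-- def _running_max(xs):
--     out = []
--     m = xs[0]
--     for x in xs:
--         m = m if m > x else x
--         out.append(m)
--     return out
--
--
-- def findValidElements(nums: list[int]) -> list[int]:
--     n = len(nums)
--     pre = _running_max(nums)                 # pre[i]  = max(nums[:i+1])
--     suf = _running_max(nums[::-1])[::-1]     # suf[i]  = max(nums[i:])
--     return [x for i, x in enumerate(nums)
--             if i == 0 or i == n - 1 or x > suf[i + 1] or x > pre[i - 1]]
-- ===== Notes on version B (the rewrite author's own statement) =====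
-- stated objective: faster
-- what changed: Replaced the per-element left/right rescans with one prefix-max and one suffix-max pass, so each element is tested in O(1).
import Mathlib
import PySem

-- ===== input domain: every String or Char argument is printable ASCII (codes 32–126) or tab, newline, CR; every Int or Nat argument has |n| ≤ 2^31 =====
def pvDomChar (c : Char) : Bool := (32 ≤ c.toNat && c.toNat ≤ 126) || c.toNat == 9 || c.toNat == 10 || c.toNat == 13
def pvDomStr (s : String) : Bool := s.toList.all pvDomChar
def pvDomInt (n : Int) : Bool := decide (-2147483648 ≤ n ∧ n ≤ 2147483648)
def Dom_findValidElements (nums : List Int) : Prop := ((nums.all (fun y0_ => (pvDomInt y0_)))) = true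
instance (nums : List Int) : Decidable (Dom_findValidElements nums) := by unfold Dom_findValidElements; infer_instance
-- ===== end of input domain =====

-- B replaces A's per-element left/right rescans by one prefix-max and one suffix-max pass (objective: faster).

-- ===== PORT A =====
def findValidElements (nums : List Int) : List Int :=
  let n : Int := (nums.length : Int)
  let _maxi : Int := PySem.List.pyGetD nums 0 0   -- maxi = nums[0] (unused; raises on the empty list, excluded by Pre_)
  (PySem.List.pyRange 0 n 1).foldl (fun res i =>
    if i == 0 || i == n - 1 then
      res ++ [PySem.List.pyGetD nums i 0]
    else
      -- for j in range(i+1, n): if nums[i] <= nums[j]: flag = 0; break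
      let flag : Int := (PySem.List.pyRange (i + 1) n 1).foldl
        (fun f j => if PySem.List.pyGetD nums i 0 ≤ PySem.List.pyGetD nums j 0 then 0 else f) 1
      if flag ≠ 0 then res ++ [PySem.List.pyGetD nums i 0]
      else
        let flag2 : Int := (PySem.List.pyRange 0 i 1).foldl
          (fun f j => if PySem.List.pyGetD nums i 0 ≤ PySem.List.pyGetD nums j 0 then 0 else f) 1
        if flag2 ≠ 0 then res ++ [PySem.List.pyGetD nums i 0] else res) []

-- ===== PORT B =====
-- _running_max(xs): out = []; m = xs[0]; for x in xs: m = m if m > x else x; out.append(m)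
def runningMax (xs : List Int) : List Int :=
  (xs.foldl (fun (st : Int × List Int) x =>
      let m := if st.1 > x then st.1 else x
      (m, st.2 ++ [m]))
    (PySem.List.pyGetD xs 0 0, ([] : List Int))).2

def findValidElements_alt (nums : List Int) : List Int :=
  let n : Int := (nums.length : Int)
  let pre := runningMax nums
  -- nums[::-1] = reverse (PySem.List.slice?_none_none_neg_one)
  let suf := (runningMax nums.reverse).reverse
  (PySem.List.enumerate nums 0).filterMap (fun p =>
    if p.1 == 0 || p.1 == n - 1
        || PySem.List.pyGetD suf (p.1 + 1) 0 < p.2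
        || PySem.List.pyGetD pre (p.1 - 1) 0 < p.2
    then some p.2 else none)

-- ===== PRECONDITION & SPEC =====
-- Pre_ excludes only the empty list, on which A raises IndexError at its first element access.
def Pre_findValidElements (nums : List Int) : Prop := nums ≠ []
instance (nums : List Int) : Decidable (Pre_findValidElements nums) := by
  unfold Pre_findValidElements; infer_instance
def pvWitness_findValidElements : List Int := [3, 1, 2]

def Spec_findValidElements (nums : List Int) (out : List Int) : Prop := out = findValidElements_alt nums
instance (nums : List Int) (out : List Int) : Decidable (Spec_findValidElements nums out) := by
  unfold Spec_findValidElements; infer_instance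

-- ===== CLAIM (what is proved, stated in full; the proofs are below) =====
def Claim_equal_findValidElements : Prop := ∀ (nums : List Int), Dom_findValidElements nums → Pre_findValidElements nums → Spec_findValidElements nums (findValidElements nums)

-- ===== LEMMAS AND PROOFS =====

-- A's break-out flag loop: 1 iff no j in the list satisfies c.
theorem flagFold (c : Int → Prop) [DecidablePred c] (l : List Int) (a : Int) :
    l.foldl (fun f j => if c j then (0 : Int) else f) a
      = if l.any (fun j => decide (c j)) then 0 else a := by
  induction l generalizing a with
  | nil => simp
  | cons x l ih => by_cases h : c x <;> simp [h, ih]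

-- scanMax m xs: the list of running maxima of xs seeded with m.
def scanMax (m : Int) : List Int → List Int
  | [] => []
  | x :: xs => max m x :: scanMax (max m x) xs

theorem scanMax_length (m : Int) (xs : List Int) : (scanMax m xs).length = xs.length := by
  induction xs generalizing m with
  | nil => rfl
  | cons x xs ih => simp [scanMax, ih]

theorem runningMax_go (xs : List Int) (m : Int) (acc : List Int) :
    (xs.foldl (fun (st : Int × List Int) x =>
        let m' := if st.1 > x then st.1 else x
        (m', st.2 ++ [m'])) (m, acc)).2 = acc ++ scanMax m xs := by
  induction xs generalizing m acc with
  | nil => simp [scanMax]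
  | cons x xs ih =>
      have hm : (if m > x then m else x) = max m x := by
        rw [Int.max_def]; split_ifs <;> omega
      simp only [List.foldl_cons, ih, scanMax, hm]
      simp

theorem runningMax_eq (xs : List Int) :
    runningMax xs = scanMax (PySem.List.pyGetD xs 0 0) xs := by
  simpa using runningMax_go xs (PySem.List.pyGetD xs 0 0) []

theorem scanMax_getElem (m : Int) (xs : List Int) (k : Nat) (hk : k < xs.length) :
    (scanMax m xs)[k]'(by simpa [scanMax_length]) = (xs.take (k + 1)).foldl max m := by
  induction xs generalizing m k with
  | nil => simp at hk
  | cons x xs ih =>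
      cases k with
      | zero => simp [scanMax]
      | succ k => simpa [scanMax] using ih (max m x) k (by simpa using hk)

theorem gt_foldl_max (a m : Int) (ys : List Int) :
    ys.foldl max m < a ↔ m < a ∧ ∀ y ∈ ys, y < a := by
  induction ys generalizing m with
  | nil => simp
  | cons y ys ih =>
      simp only [List.foldl_cons, ih, max_lt_iff, List.mem_cons]
      constructor
      · rintro ⟨⟨h1, h2⟩, h3⟩; exact ⟨h1, by rintro z (rfl | hz); exact h2; exact h3 z hz⟩
      · rintro ⟨h1, h2⟩; exact ⟨⟨h1, h2 y (Or.inl rfl)⟩, fun z hz => h2 z (Or.inr hz)⟩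

theorem filterMap_if {α β : Type} (p : α → Bool) (f : α → β) (l : List α) :
    l.filterMap (fun x => if p x then some (f x) else none) = (l.filter p).map f := by
  induction l with
  | nil => rfl
  | cons x l ih => by_cases h : p x <;> simp [h, ih]

theorem findValidElements_eq_filter (nums : List Int) :
    findValidElements nums =
      ((PySem.List.pyRange 0 (nums.length : Int) 1).filter (fun i =>
        (i == 0 || i == (nums.length : Int) - 1)
        || !(PySem.List.pyRange (i + 1) (nums.length : Int) 1).any
              (fun j => PySem.List.pyGetD nums i 0 ≤ PySem.List.pyGetD nums j 0)
        || !(PySem.List.pyRange 0 i 1).any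
              (fun j => PySem.List.pyGetD nums i 0 ≤ PySem.List.pyGetD nums j 0))).map
        (fun i => PySem.List.pyGetD nums i 0) := by
  have hf : (fun (res : List Int) (i : Int) =>
      if i == 0 || i == (nums.length : Int) - 1 then
        res ++ [PySem.List.pyGetD nums i 0]
      else
        let flag : Int := (PySem.List.pyRange (i + 1) (nums.length : Int) 1).foldl
          (fun f j => if PySem.List.pyGetD nums i 0 ≤ PySem.List.pyGetD nums j 0 then 0 else f) 1
        if flag ≠ 0 then res ++ [PySem.List.pyGetD nums i 0]
        else
          let flag2 : Int := (PySem.List.pyRange 0 i 1).foldl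
            (fun f j => if PySem.List.pyGetD nums i 0 ≤ PySem.List.pyGetD nums j 0 then 0 else f) 1
          if flag2 ≠ 0 then res ++ [PySem.List.pyGetD nums i 0] else res)
    = (fun res i =>
        if ((i == 0 || i == (nums.length : Int) - 1)
            || !(PySem.List.pyRange (i + 1) (nums.length : Int) 1).any
                  (fun j => PySem.List.pyGetD nums i 0 ≤ PySem.List.pyGetD nums j 0)
            || !(PySem.List.pyRange 0 i 1).any
                  (fun j => PySem.List.pyGetD nums i 0 ≤ PySem.List.pyGetD nums j 0))
        then res ++ [PySem.List.pyGetD nums i 0] else res) := by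
    funext res i
    simp only [flagFold]
    by_cases h0 : (i == 0 || i == (nums.length : Int) - 1) = true <;>
      by_cases h1 : ((PySem.List.pyRange (i + 1) (nums.length : Int) 1).any
          (fun j => PySem.List.pyGetD nums i 0 ≤ PySem.List.pyGetD nums j 0)) = true <;>
      by_cases h2 : ((PySem.List.pyRange 0 i 1).any
          (fun j => PySem.List.pyGetD nums i 0 ≤ PySem.List.pyGetD nums j 0)) = true <;>
      simp [h0, h1, h2]
  show (PySem.List.pyRange 0 (nums.length : Int) 1).foldl
      (fun (res : List Int) (i : Int) =>
        if i == 0 || i == (nums.length : Int) - 1 then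
          res ++ [PySem.List.pyGetD nums i 0]
        else
          let flag : Int := (PySem.List.pyRange (i + 1) (nums.length : Int) 1).foldl
            (fun f j => if PySem.List.pyGetD nums i 0 ≤ PySem.List.pyGetD nums j 0 then 0 else f) 1
          if flag ≠ 0 then res ++ [PySem.List.pyGetD nums i 0]
          else
            let flag2 : Int := (PySem.List.pyRange 0 i 1).foldl
              (fun f j => if PySem.List.pyGetD nums i 0 ≤ PySem.List.pyGetD nums j 0 then 0 else f) 1
            if flag2 ≠ 0 then res ++ [PySem.List.pyGetD nums i 0] else res) [] = _
  rw [hf]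
  exact PySem.List.foldl_append_if _ _ _ _

theorem findValidElements_alt_eq_filter (nums : List Int) :
    findValidElements_alt nums =
      ((PySem.List.pyRange 0 (nums.length : Int) 1).filter (fun i =>
        (i == 0 || i == (nums.length : Int) - 1)
        || PySem.List.pyGetD ((runningMax nums.reverse).reverse) (i + 1) 0 < PySem.List.pyGetD nums i 0
        || PySem.List.pyGetD (runningMax nums) (i - 1) 0 < PySem.List.pyGetD nums i 0)).map
        (fun i => PySem.List.pyGetD nums i 0) := by
  show (PySem.List.enumerate nums 0).filterMap (fun p : Int × Int =>
      if p.1 == 0 || p.1 == (nums.length : Int) - 1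
          || PySem.List.pyGetD ((runningMax nums.reverse).reverse) (p.1 + 1) 0 < p.2
          || PySem.List.pyGetD (runningMax nums) (p.1 - 1) 0 < p.2
      then some p.2 else none) = _
  rw [PySem.List.enumerate_eq_map_pyRange (xs := nums) (d := 0), List.filterMap_map]
  exact filterMap_if _ _ _

-- membership bridge: a bounded index quantifier is a quantifier over a take/drop segment
theorem forall_seg (xs : List Int) (a : Int) (lo hi : Int) (h0 : 0 ≤ lo) (hh : hi ≤ (xs.length : Int)) :
    (∀ j : Int, lo ≤ j → j < hi → PySem.List.pyGetD xs j 0 < a)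
      ↔ (∀ y ∈ (xs.take hi.toNat).drop lo.toNat, y < a) := by
  constructor
  · intro H y hy
    obtain ⟨m, hm, rfl⟩ := List.mem_iff_getElem.1 hy
    have hb : lo.toNat + m < hi.toNat ∧ hi.toNat ≤ xs.length := by
      simp [List.length_drop, List.length_take] at hm; omega
    rw [List.getElem_drop, List.getElem_take]
    have hj := H ((lo.toNat + m : Nat) : Int) (by omega) (by omega)
    rw [PySem.List.pyGetD_eq_getElem _ _ (by omega) (by omega)] at hj
    simp only [Int.toNat_natCast] at hj
    exact hj
  · intro H j hj1 hj2
    rw [PySem.List.pyGetD_eq_getElem _ _ (by omega) (by omega)]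
    have he : xs[j.toNat]'(by omega) = ((xs.take hi.toNat).drop lo.toNat)[j.toNat - lo.toNat]'(by
        simp [List.length_drop, List.length_take]; omega) := by
      rw [List.getElem_drop, List.getElem_take]
      congr 1; omega
    rw [he]
    exact H _ (List.getElem_mem _)

-- middle-index equivalence, prefix side
theorem prefix_cond (nums : List Int) (hne : nums ≠ []) (i : Int)
    (h0 : 0 < i) (hn : i < (nums.length : Int)) :
    (!(PySem.List.pyRange 0 i 1).any
        (fun j => PySem.List.pyGetD nums i 0 ≤ PySem.List.pyGetD nums j 0))
      = decide (PySem.List.pyGetD (runningMax nums) (i - 1) 0 < PySem.List.pyGetD nums i 0) := by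
  obtain ⟨h, t, rfl⟩ : ∃ h t, nums = h :: t := by
    cases nums with
    | nil => exact absurd rfl hne
    | cons h t => exact ⟨h, t, rfl⟩
  rw [Bool.eq_iff_iff, runningMax_eq]
  rw [PySem.List.pyGetD_eq_getElem (scanMax (PySem.List.pyGetD (h :: t) 0 0) (h :: t)) 0
    (by omega) (by rw [scanMax_length]; omega)]
  rw [scanMax_getElem _ _ _ (by simp at hn ⊢; omega)]
  have hseg := forall_seg (h :: t) (PySem.List.pyGetD (h :: t) i 0) 0 i (le_refl 0)
    (by omega)
  simp only [Int.toNat_zero, List.drop_zero] at hseg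
  have hik : (i - 1).toNat + 1 = i.toNat := by omega
  rw [hik]
  simp only [Bool.not_eq_true', List.any_eq_false, decide_eq_true_eq,
    PySem.List.mem_pyRange_one, not_le, PySem.List.pyGetD_zero_cons]
  simp only [gt_foldl_max]
  constructor
  · intro H
    refine ⟨?_, hseg.mp (fun j hj1 hj2 => H j ⟨hj1, hj2⟩)⟩
    have h00 := H 0 ⟨le_refl 0, h0⟩
    simpa [PySem.List.pyGetD_zero_cons] using h00
  · rintro ⟨_, H2⟩ j hj
    exact hseg.mpr H2 j hj.1 hj.2

-- middle-index equivalence, suffix side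
theorem suffix_cond (nums : List Int) (hne : nums ≠ []) (i : Int)
    (h0 : 0 ≤ i) (hn : i < (nums.length : Int) - 1) :
    (!(PySem.List.pyRange (i + 1) (nums.length : Int) 1).any
        (fun j => PySem.List.pyGetD nums i 0 ≤ PySem.List.pyGetD nums j 0))
      = decide (PySem.List.pyGetD ((runningMax nums.reverse).reverse) (i + 1) 0 < PySem.List.pyGetD nums i 0) := by
  obtain ⟨h, t, rfl⟩ : ∃ h t, nums = h :: t := by
    cases nums with
    | nil => exact absurd rfl hne
    | cons h t => exact ⟨h, t, rfl⟩
  rw [Bool.eq_iff_iff, runningMax_eq]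
  rw [PySem.List.pyGetD_eq_getElem
    (xs := (scanMax (PySem.List.pyGetD (h :: t).reverse 0 0) (h :: t).reverse).reverse)
    (i := i + 1) 0 (by omega) (by simp only [scanMax_length, List.length_reverse, List.length_cons]; simp at hn; omega)]
  rw [List.getElem_reverse]
  rw [scanMax_getElem _ _ _ (by simp only [scanMax_length, List.length_reverse, List.length_cons]; simp at hn; omega)]
  have hidx : (scanMax (PySem.List.pyGetD (h :: t).reverse 0 0) (h :: t).reverse).length - 1
      - (i + 1).toNat + 1 = (h :: t).length - (i + 1).toNat := by
    simp only [scanMax_length, List.length_reverse, List.length_cons]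
    simp at hn; omega
  rw [hidx, List.take_reverse]
  have hdd : (h :: t).length - ((h :: t).length - (i + 1).toNat) = (i + 1).toNat := by
    simp only [List.length_cons]; simp at hn; omega
  rw [hdd]
  have hl0 : PySem.List.pyGetD (h :: t).reverse 0 0 = (h :: t)[(h :: t).length - 1]'(by simp) := by
    rw [PySem.List.pyGetD_eq_getElem _ _ (by omega) (by simp)]
    rw [List.getElem_reverse]
    simp
  rw [hl0]
  simp only [gt_foldl_max]
  have hseg := forall_seg (h :: t) (PySem.List.pyGetD (h :: t) i 0) (i + 1)
    ((h :: t).length : Int) (by omega) (by omega)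
  rw [Int.toNat_natCast, List.take_length] at hseg
  simp only [Bool.not_eq_true', List.any_eq_false, decide_eq_true_eq,
    PySem.List.mem_pyRange_one, not_le, List.mem_reverse]
  constructor
  · intro H
    refine ⟨?_, hseg.mp (fun j hj1 hj2 => H j ⟨hj1, hj2⟩)⟩
    have hlast := H (((h :: t).length : Int) - 1) ⟨by omega, by omega⟩
    rw [PySem.List.pyGetD_eq_getElem _ _ (by omega) (by omega)] at hlast
    have hidx2 : (((h :: t).length : Int) - 1).toNat = (h :: t).length - 1 := by omega
    simp only [hidx2] at hlast
    exact hlast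
  · rintro ⟨_, H2⟩ j hj
    exact hseg.mpr H2 j hj.1 hj.2

-- ===== VERDICT (by name: the statement is the Claim_ definition above) =====
theorem findValidElements_spec : Claim_equal_findValidElements := by
  intro nums _hdom hne
  unfold Spec_findValidElements
  rw [findValidElements_eq_filter, findValidElements_alt_eq_filter]
  congr 1
  apply List.filter_congr
  intro i hi
  rw [PySem.List.mem_pyRange_one] at hi
  by_cases h0 : i = 0
  · simp [h0]
  · by_cases hl : i = (nums.length : Int) - 1
    · simp [hl]
    · have e1 := suffix_cond nums hne i hi.1 (by omega)
      have e2 := prefix_cond nums hne i (by omega) hi.2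
      simp only [show (i == 0) = false by simpa using h0,
        show (i == (nums.length : Int) - 1) = false by simpa using hl,
        Bool.false_or, e1, e2]
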